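-- pv_equiv track=rewrite | github.com/E-Williamson121/Unique-Crosswordles | uniquetripleanalysis.py | bucket_puzzles_by_coln
-- ===== SOURCE A (Python) =====
-- def numtoternary(x):
--     nums = []
--     while x > 0:
--         x, r = divmod(x, 3)
--         nums.append(r)
--     while len(nums) < 5: nums.append(0)
--     return nums[::-1]
--
-- def sort_dict(mydict):
--     sorted_dict = {}
--     for key in sorted(mydict):
--         sorted_dict[key] = mydict[key]
--     return sorted_dict
--
-- def bucket_puzzles_by_coln(puzzles):
--     number_puzzles = {}
--     number_counts = {}
--     for puzzle in puzzles:
--         words, nums = puzzle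
--         s = sum(map(lambda x: sum(map(lambda x: x > 0, numtoternary(x))), nums))
--         if s in number_puzzles.keys():
--             number_puzzles[s].append(puzzle)
--             number_counts[s] += 1
--         else:
--             number_puzzles[s] = [puzzle]
--             number_counts[s] = 1
--     return number_puzzles, sort_dict(number_counts)
-- ===== SOURCE B (Python) =====
-- def ternary_weight(x):
--     c, p = 0, 1
--     while p <= x:
--         if (x // p) % 3:
--             c += 1
--         p *= 3
--     return c
--
-- def bucket_puzzles_by_coln(puzzles):
--     keys = [sum(ternary_weight(n) for n in nums) for _, nums in puzzles]
--     order = list(dict.fromkeys(keys))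
--     number_puzzles = {k: [p for p, kk in zip(puzzles, keys) if kk == k] for k in order}
--     number_counts = {k: keys.count(k) for k in sorted(order)}
--     return number_puzzles, number_counts
-- ===== Notes on version B (the rewrite author's own statement) =====
-- stated objective: alternative
-- what changed: B replaces A's single lockstep loop maintaining two mutating dicts with staged passes: compute all keys once by probing powers of 3 ((x//p)%3 instead of building, padding and reversing a divmod digit list per number), dedup keys for first-appearance order, then build each bucket by a filtering comprehension over the zipped list and the counts via list.count; no incremental dict mutation and no sort_dict helper remain.
import Mathlib
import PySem

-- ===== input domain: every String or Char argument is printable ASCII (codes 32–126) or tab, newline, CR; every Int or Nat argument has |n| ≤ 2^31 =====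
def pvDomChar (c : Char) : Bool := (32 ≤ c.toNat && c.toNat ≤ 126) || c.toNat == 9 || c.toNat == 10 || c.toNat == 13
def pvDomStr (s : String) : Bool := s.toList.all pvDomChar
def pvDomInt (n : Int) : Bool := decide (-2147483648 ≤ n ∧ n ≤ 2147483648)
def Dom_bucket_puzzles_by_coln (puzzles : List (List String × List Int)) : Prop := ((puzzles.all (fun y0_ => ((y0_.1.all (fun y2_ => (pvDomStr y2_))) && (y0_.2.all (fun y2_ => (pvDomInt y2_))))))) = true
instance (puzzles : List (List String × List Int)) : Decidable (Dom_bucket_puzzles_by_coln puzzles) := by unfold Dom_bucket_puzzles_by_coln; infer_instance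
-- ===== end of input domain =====

-- B replaces A's lockstep loop over two mutating dicts with staged passes: keys via powers-of-3
-- probing, dedup for first-appearance order, buckets by filtering, counts by list.count; objective: alternative.

-- ===== PORT A =====
-- while x > 0: x, r = divmod(x, 3); nums.append(r)
def numtoternaryLoop (x : Int) (nums : List Int) : List Int :=
  if _h : 0 < x then
    numtoternaryLoop (PySem.Int.floordiv x 3) (nums ++ [PySem.Int.mod x 3])
  else nums
termination_by x.toNat
decreasing_by
  have : PySem.Int.floordiv x 3 = x / 3 := PySem.Int.floordiv_eq_ediv_of_pos (by norm_num)
  omega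

def numtoternary (x : Int) : List Int :=
  let nums := numtoternaryLoop x []
  -- while len(nums) < 5: nums.append(0)
  let nums := nums ++ List.replicate (5 - nums.length) 0
  nums.reverse   -- nums[::-1]

-- the body of A's for-loop (the two dicts are the two components of the state)
def bucketStepA (st : PySem.Dict Int (List (List String × List Int)) × PySem.Dict Int Int)
    (puzzle : List String × List Int) :
    PySem.Dict Int (List (List String × List Int)) × PySem.Dict Int Int :=
  let s : Int := (puzzle.2.map (fun x =>
      ((numtoternary x).map (fun d => if 0 < d then (1 : Int) else 0)).sum)).sum
  if st.1.contains s then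
    (st.1.modify s [] (fun v => v ++ [puzzle]), st.2.modify s 0 (fun c => c + 1))
  else
    (st.1.insert s [puzzle], st.2.insert s 1)

-- mydict[key] is exact as getD 0 here: key ranges over mydict's own keys
def sort_dict (d : PySem.Dict Int Int) : PySem.Dict Int Int :=
  (PySem.List.sorted d.keys (fun k => k) false).foldl
    (fun acc k => acc.insert k (d.getD k 0)) PySem.Dict.empty

def bucket_puzzles_by_coln (puzzles : List (List String × List Int)) :
    (List (Int × List (List String × List Int))) × (List (Int × Int)) :=
  let st := puzzles.foldl bucketStepA (PySem.Dict.empty, PySem.Dict.empty)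
  (st.1.items, (sort_dict st.2).items)

-- ===== PORT B =====
-- c, p = 0, 1; while p <= x: if (x // p) % 3: c += 1; p *= 3
-- ('1 ≤ p' in the guard is a totality guard only: p starts at 1 and only ever triples)
def twLoop (x p c : Int) : Int :=
  if _h : p ≤ x ∧ 1 ≤ p then
    twLoop x (3 * p) (if PySem.Int.mod (PySem.Int.floordiv x p) 3 ≠ 0 then c + 1 else c)
  else c
termination_by (x + 1 - p).toNat
decreasing_by omega

def ternary_weight (x : Int) : Int := twLoop x 1 0

def bucket_puzzles_by_coln_alt (puzzles : List (List String × List Int)) :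
    (List (Int × List (List String × List Int))) × (List (Int × Int)) :=
  let keys := puzzles.map (fun q => (q.2.map ternary_weight).sum)
  let order := PySem.List.dedup keys          -- list(dict.fromkeys(keys))
  -- {k: [p for p, kk in zip(puzzles, keys) if kk == k] for k in order}
  let number_puzzles := order.foldl
    (fun d k => d.insert k (((puzzles.zip keys).filter (fun pk => pk.2 == k)).map Prod.fst))
    PySem.Dict.empty
  -- {k: keys.count(k) for k in sorted(order)}
  let number_counts := (PySem.List.sorted order (fun k => k) false).foldl
    (fun d k => d.insert k (PySem.List.count keys k)) PySem.Dict.empty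
  (number_puzzles.items, number_counts.items)

-- ===== PRECONDITION & SPEC =====
def Spec_bucket_puzzles_by_coln (puzzles : List (List String × List Int)) (out : (List (Int × List (List String × List Int))) × (List (Int × Int))) : Prop := out = bucket_puzzles_by_coln_alt puzzles
instance (puzzles : List (List String × List Int)) (out : (List (Int × List (List String × List Int))) × (List (Int × Int))) : Decidable (Spec_bucket_puzzles_by_coln puzzles out) := by unfold Spec_bucket_puzzles_by_coln; infer_instance

-- ===== CLAIM (what is proved, stated in full; the proofs are below) =====
def Claim_equal_bucket_puzzles_by_coln : Prop := ∀ (puzzles : List (List String × List Int)), Dom_bucket_puzzles_by_coln puzzles → Spec_bucket_puzzles_by_coln puzzles (bucket_puzzles_by_coln puzzles)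

-- ===== LEMMAS AND PROOFS =====

-- proof-only divmod recursion counting nonzero ternary digits, the bridge between the two key computations
def nztAux (x : Int) (c : Int) : Int :=
  if _h : 0 < x then
    nztAux (PySem.Int.floordiv x 3) (if 0 < PySem.Int.mod x 3 then c + 1 else c)
  else c
termination_by x.toNat
decreasing_by
  have : PySem.Int.floordiv x 3 = x / 3 := PySem.Int.floordiv_eq_ediv_of_pos (by norm_num)
  omega

theorem pv_loop_sum (n : Nat) : ∀ (x : Int), x.toNat ≤ n → ∀ (nums : List Int) (c : Int),
    ((numtoternaryLoop x nums).map (fun d => if 0 < d then (1 : Int) else 0)).sum + c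
      = (nums.map (fun d => if 0 < d then (1 : Int) else 0)).sum + nztAux x c := by
  induction n with
  | zero =>
    intro x hx nums c
    have h : ¬ 0 < x := by omega
    rw [numtoternaryLoop, nztAux]
    simp [h]
  | succ n ih =>
    intro x hx nums c
    rw [numtoternaryLoop, nztAux]
    by_cases h : 0 < x
    · simp only [dif_pos h]
      have hdiv : PySem.Int.floordiv x 3 = x / 3 := PySem.Int.floordiv_eq_ediv_of_pos (by norm_num)
      have hle : (PySem.Int.floordiv x 3).toNat ≤ n := by rw [hdiv]; omega
      have ihh := ih _ hle (nums ++ [PySem.Int.mod x 3])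
        (if 0 < PySem.Int.mod x 3 then c + 1 else c)
      simp only [List.map_append, List.sum_append, List.map_cons, List.map_nil,
        List.sum_cons, List.sum_nil] at ihh
      by_cases hm : 0 < PySem.Int.mod x 3 <;> simp only [hm, if_true, if_false] at ihh ⊢ <;> omega
    · simp [h]

-- the shift law for the powers-of-3 loop: scanning from power 3p over x is scanning from power p over x // 3
theorem tw_shift (n : Nat) : ∀ (x p c : Int), 1 ≤ p → (x + 1 - 3 * p).toNat ≤ n →
    twLoop x (3 * p) c = twLoop (PySem.Int.floordiv x 3) p c := by
  induction n with
  | zero =>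
    intro x p c hp hn
    have hdiv : PySem.Int.floordiv x 3 = x / 3 := PySem.Int.floordiv_eq_ediv_of_pos (by norm_num)
    conv_lhs => rw [twLoop]
    conv_rhs => rw [twLoop]
    rw [dif_neg (by omega), dif_neg (by rw [hdiv]; omega)]
  | succ n ih =>
    intro x p c hp hn
    have hdiv : PySem.Int.floordiv x 3 = x / 3 := PySem.Int.floordiv_eq_ediv_of_pos (by norm_num)
    by_cases hg : 3 * p ≤ x
    · conv_lhs => rw [twLoop]
      conv_rhs => rw [twLoop]
      rw [dif_pos ⟨hg, by omega⟩, dif_pos (show PySem.Int.floordiv x 3 ≥ p ∧ 1 ≤ p from by rw [hdiv]; omega : p ≤ PySem.Int.floordiv x 3 ∧ 1 ≤ p)]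
      have hdig : PySem.Int.floordiv x (3 * p) = PySem.Int.floordiv (PySem.Int.floordiv x 3) p := by
        rw [hdiv, PySem.Int.floordiv_eq_ediv_of_pos (show (0:Int) < 3 * p by omega),
          PySem.Int.floordiv_eq_ediv_of_pos (show (0:Int) < p by omega)]
        exact (Int.ediv_ediv_of_nonneg (by norm_num)).symm
      rw [hdig]
      exact ih x (3 * p) _ (by omega) (by omega)
    · conv_lhs => rw [twLoop]
      conv_rhs => rw [twLoop]
      rw [dif_neg (by omega), dif_neg (by rw [hdiv]; omega)]

theorem tw_eq_nzt (n : Nat) : ∀ (x c : Int), x.toNat ≤ n → twLoop x 1 c = nztAux x c := by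
  induction n with
  | zero =>
    intro x c hx
    rw [twLoop, nztAux]
    rw [dif_neg (by omega), dif_neg (by omega)]
  | succ n ih =>
    intro x c hx
    conv_lhs => rw [twLoop]
    conv_rhs => rw [nztAux]
    by_cases h : 0 < x
    · rw [dif_pos (show 1 ≤ x ∧ (1:Int) ≤ 1 from ⟨by omega, le_refl 1⟩), dif_pos h]
      have h1 : PySem.Int.floordiv x 1 = x := by
        rw [PySem.Int.floordiv_eq_ediv_of_pos (by norm_num)]; exact Int.ediv_one x
      have hm : PySem.Int.mod x 3 = x % 3 := PySem.Int.mod_eq_emod_of_pos (by norm_num)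
      have hcond : (PySem.Int.mod (PySem.Int.floordiv x 1) 3 ≠ 0) ↔ (0 < PySem.Int.mod x 3) := by
        rw [h1, hm]; omega
      have hdiv3 : PySem.Int.floordiv x 3 = x / 3 := PySem.Int.floordiv_eq_ediv_of_pos (by norm_num)
      have hstep : twLoop x (3 * 1) (if PySem.Int.mod (PySem.Int.floordiv x 1) 3 ≠ 0 then c + 1 else c)
          = twLoop (PySem.Int.floordiv x 3) 1 (if PySem.Int.mod (PySem.Int.floordiv x 1) 3 ≠ 0 then c + 1 else c) :=
        tw_shift (x + 1 - 3).toNat x 1 _ (le_refl 1) (le_refl _)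
      rw [hstep, ih (PySem.Int.floordiv x 3) _ (by rw [hdiv3]; omega)]
      by_cases hc : 0 < PySem.Int.mod x 3
      · rw [if_pos (hcond.mpr hc), if_pos hc]
      · rw [if_neg (fun hn => hc (hcond.mp hn)), if_neg hc]
    · rw [dif_neg (by omega), dif_neg h]

@[simp] theorem pv_key_eq (x : Int) :
    ((numtoternary x).map (fun d => if 0 < d then (1 : Int) else 0)).sum
      = ternary_weight x := by
  have h := pv_loop_sum x.toNat x le_rfl [] 0
  simp only [List.map_nil, List.sum_nil, add_zero, zero_add] at h
  have h2 := tw_eq_nzt x.toNat x 0 le_rfl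
  unfold numtoternary ternary_weight
  rw [h2]
  simp [List.sum_reverse, List.map_reverse, h]

-- B's key function
def keyOf (q : List String × List Int) : Int := (q.2.map ternary_weight).sum

-- the two components of A's fold are independent modify-loops
def stepNP (d : PySem.Dict Int (List (List String × List Int))) (q : List String × List Int) :
    PySem.Dict Int (List (List String × List Int)) :=
  d.modify (keyOf q) [] (fun v => v ++ [q])

def stepNC (d : PySem.Dict Int Int) (q : List String × List Int) : PySem.Dict Int Int :=
  d.modify (keyOf q) 0 (fun c => c + 1)

theorem foldA_split : ∀ (l : List (List String × List Int))
    (d1 : PySem.Dict Int (List (List String × List Int))) (d2 : PySem.Dict Int Int),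
    d2.keys = d1.keys →
    l.foldl bucketStepA (d1, d2) = (l.foldl stepNP d1, l.foldl stepNC d2) := by
  intro l
  induction l with
  | nil => intro d1 d2 _; rfl
  | cons q l ih =>
    intro d1 d2 hk
    simp only [List.foldl_cons]
    have hc12 : d2.contains ((q.2.map ternary_weight).sum) = d1.contains ((q.2.map ternary_weight).sum) := by
      rw [PySem.Dict.contains_eq_decide_mem_keys, PySem.Dict.contains_eq_decide_mem_keys, hk]
    have hstep : bucketStepA (d1, d2) q = (stepNP d1 q, stepNC d2 q) := by
      simp only [bucketStepA, pv_key_eq]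
      by_cases hc : d1.contains ((q.2.map ternary_weight).sum)
      · rw [if_pos hc]; rfl
      · rw [if_neg (by simp [hc])]
        unfold stepNP stepNC keyOf PySem.Dict.modify
        rw [PySem.Dict.getD_of_not_contains _ _ (by simp [hc]),
          PySem.Dict.getD_of_not_contains _ _ (by rw [hc12]; simp [hc])]
        rfl
    rw [hstep]
    apply ih
    unfold stepNP stepNC keyOf PySem.Dict.modify
    by_cases hc : d1.contains ((q.2.map ternary_weight).sum)
    · rw [PySem.Dict.keys_insert_of_contains _ _ (by rw [hc12]; exact hc),
        PySem.Dict.keys_insert_of_contains _ _ hc, hk]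
    · rw [PySem.Dict.keys_insert_of_not_contains _ _ (by rw [hc12]; simp [hc]),
        PySem.Dict.keys_insert_of_not_contains _ _ (by simp [hc]), hk]

theorem zip_key_filter (l : List (List String × List Int)) (k : Int) :
    ((l.zip (l.map keyOf)).filter (fun pk => pk.2 == k)).map Prod.fst
      = l.filter (fun q => keyOf q == k) := by
  induction l with
  | nil => rfl
  | cons q l ih =>
    simp only [List.map_cons, List.zip_cons_cons, List.filter_cons]
    by_cases h : keyOf q == k
    · simp only [h, if_pos] at *
      simp [ih]
    · simp only [h] at *
      simp [ih]

-- ===== VERDICT (by name: the statement is the Claim_ definition above) =====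
theorem bucket_puzzles_by_coln_spec : Claim_equal_bucket_puzzles_by_coln := by
  intro puzzles _dom
  unfold Spec_bucket_puzzles_by_coln
  simp only [bucket_puzzles_by_coln, bucket_puzzles_by_coln_alt, sort_dict]
  rw [foldA_split puzzles PySem.Dict.empty PySem.Dict.empty rfl]
  have hkk : (puzzles.map fun q => (q.2.map ternary_weight).sum) = puzzles.map keyOf := rfl
  rw [hkk]
  have hNP : List.foldl stepNP PySem.Dict.empty puzzles
      = List.foldl (fun d p => d.modify p.1 [] (fun v => v ++ [p.2])) PySem.Dict.empty
          (puzzles.map (fun q => (keyOf q, q))) := by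
    rw [List.foldl_map]; rfl
  have hgetD : ∀ k, (List.foldl stepNP PySem.Dict.empty puzzles).getD k []
      = puzzles.filter (fun q => keyOf q == k) := by
    intro k
    rw [hNP, PySem.Dict.getD_foldl_modify_append]
    simp [List.filter_map, List.map_map, Function.comp_def]
  have hkeys : (List.foldl stepNP PySem.Dict.empty puzzles).keys
      = PySem.Set.ofList (puzzles.map keyOf) := by
    rw [hNP, PySem.Dict.keys_foldl_modify_key]
    simp [PySem.Set.update, PySem.Set.ofList, List.map_map, Function.comp_def]
  have hnodup : (List.foldl stepNP PySem.Dict.empty puzzles).keys.Nodup := by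
    rw [hkeys]; exact PySem.Set.nodup_ofList _
  have hNC : List.foldl stepNC PySem.Dict.empty puzzles = PySem.Dict.counter (puzzles.map keyOf) := by
    rw [PySem.Dict.counter_eq_foldl, List.foldl_map]; rfl
  have hsortednodup : ((PySem.List.sorted (PySem.Set.ofList (puzzles.map keyOf)) (fun k => k) false).map (fun a => a)).Nodup := by
    simpa using ((PySem.List.sorted_perm (PySem.Set.ofList (puzzles.map keyOf)) (fun k => k) false).nodup_iff.mpr (PySem.Set.nodup_ofList _))
  refine Prod.ext ?_ ?_
  · -- number_puzzles
    dsimp only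
    rw [PySem.Dict.items_eq_map_keys _ hnodup [], hkeys, PySem.List.dedup_eq_ofList,
      PySem.Dict.items_foldl_insert_fresh _ (fun a => a) _ _
        (fun a _ => PySem.Dict.contains_empty a)
        (by simp [PySem.Set.nodup_ofList]),
      show (PySem.Dict.empty : PySem.Dict Int (List (List String × List Int))).items = [] from rfl,
      List.nil_append]
    refine List.map_congr_left (fun k _ => ?_)
    rw [hgetD k, zip_key_filter puzzles k]
  · -- number_counts
    dsimp only
    rw [hNC, PySem.Dict.keys_counter, PySem.List.dedup_eq_ofList,
      PySem.Dict.items_foldl_insert_fresh _ (fun a => a) _ _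
        (fun a _ => PySem.Dict.contains_empty a) hsortednodup,
      PySem.Dict.items_foldl_insert_fresh _ (fun a => a) _ _
        (fun a _ => PySem.Dict.contains_empty a) hsortednodup]
    refine congrArg _ (List.map_congr_left (fun k _ => ?_))
    rw [PySem.Dict.getD_counter, PySem.List.count_eq]
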